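-- pv_equiv track=rewrite | github.com/Chadhendrixs/LaptopChargingStatus | main.py | calculate_length
-- ===== SOURCE A (Python) =====
-- def calculate_length(num):
--      x = num
--      y = 0
--      while True:
--          if x == 0:
--                  return(y)
--                  break
--          else:
--                  y = y+1
--                  x = x-5
-- ===== SOURCE B (Python) =====
-- def calculate_length(num):
--     return num // 5
-- ===== Notes on version B (the rewrite author's own statement) =====
-- stated objective: simpler
-- what changed: Replaces the subtract-5-and-count loop with a single integer division num // 5.
import Mathlib
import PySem

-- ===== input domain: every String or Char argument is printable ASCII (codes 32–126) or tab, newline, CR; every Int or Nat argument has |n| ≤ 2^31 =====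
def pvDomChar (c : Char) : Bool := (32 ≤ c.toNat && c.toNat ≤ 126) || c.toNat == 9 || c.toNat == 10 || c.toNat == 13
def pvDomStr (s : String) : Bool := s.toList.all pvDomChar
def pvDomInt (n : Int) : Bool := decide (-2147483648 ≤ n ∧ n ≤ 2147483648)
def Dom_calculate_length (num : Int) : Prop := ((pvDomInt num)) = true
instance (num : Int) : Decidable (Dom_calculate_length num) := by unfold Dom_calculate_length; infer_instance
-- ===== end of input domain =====

-- B replaces A's subtract-5-and-count loop by a single integer division (simpler, closed form).


-- ===== PORT A =====
-- the 'while True' loop: on x = 0 return y, else y+1, x-5.  In Python the loop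
-- diverges unless num is a nonnegative multiple of 5; those inputs are outside
-- Pre_ below, and the port returns an arbitrary 0 there to stay total.
def pvLoopA (x y : Int) : Int :=
  if x = 0 then y
  else if h : 0 < x ∧ x % 5 = 0 then pvLoopA (x - 5) (y + 1)
  else 0
termination_by x.toNat
decreasing_by
  rcases h with ⟨hx, hm⟩
  omega

def calculate_length (num : Int) : Int := pvLoopA num 0

-- ===== PORT B =====
def calculate_length_alt (num : Int) : Int := PySem.Int.floordiv num 5

-- ===== PRECONDITION & SPEC =====
-- A's loop returns only when repeatedly subtracting 5 reaches exactly 0, i.e.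
-- num is a nonnegative multiple of 5; on every other input the Python loop diverges.
def Pre_calculate_length (num : Int) : Prop := 0 ≤ num ∧ num % 5 = 0
instance (num : Int) : Decidable (Pre_calculate_length num) := by unfold Pre_calculate_length; infer_instance
def pvWitness_calculate_length : Int := (20)

def Spec_calculate_length (num : Int) (out : Int) : Prop := out = calculate_length_alt num
instance (num : Int) (out : Int) : Decidable (Spec_calculate_length num out) := by unfold Spec_calculate_length; infer_instance

-- ===== CLAIM (what is proved, stated in full; the proofs are below) =====
def Claim_equal_calculate_length : Prop := ∀ (num : Int), Dom_calculate_length num → Pre_calculate_length num → Spec_calculate_length num (calculate_length num)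

-- ===== LEMMAS AND PROOFS =====
theorem pvLoopA_eq (n : Nat) : ∀ (x y : Int), x.toNat = n → 0 ≤ x → x % 5 = 0 → pvLoopA x y = y + x / 5 := by
  induction n using Nat.strong_induction_on with
  | _ n ih =>
    intro x y hn hx hm
    rw [pvLoopA]
    by_cases h0 : x = 0
    · simp [h0]
    · have hx5 : 5 ≤ x := by omega
      have hrec : pvLoopA (x - 5) (y + 1) = (y + 1) + (x - 5) / 5 := by
        apply ih (x - 5).toNat (by omega) _ _ rfl (by omega) (by omega)
      simp only [h0, if_false]
      rw [dif_pos ⟨by omega, hm⟩, hrec]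
      omega

-- ===== VERDICT (by name: the statement is the Claim_ definition above) =====
theorem calculate_length_spec : Claim_equal_calculate_length := by
  intro num _ hpre
  unfold Spec_calculate_length calculate_length calculate_length_alt
  rw [pvLoopA_eq num.toNat num 0 rfl hpre.1 hpre.2,
      PySem.Int.floordiv_eq_ediv_of_pos (by norm_num)]
  omega
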